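-- pv_equiv track=rewrite | github.com/tony-728/Algorithm | python/programmers/Lev1/대충만든자판.py | solution
-- ===== SOURCE A (Python) =====
-- def solution(keymap, targets):
--     answer = []
--     keymap_dict = {}
--     for key in keymap:
--         if keymap_dict:
--             for k in key:
--                 if k in keymap_dict:
--                     keymap_dict[k] = min(keymap_dict[k], key.find(k) + 1)
--                 else:
--                     keymap_dict[k] = key.find(k) + 1
--         else:
--             keymap_dict = {k: key.find(k) + 1 for k in key}
--
--     for target in targets:
--         count = 0
--         for t in target:
--             if t in keymap_dict:
--                 count += keymap_dict[t]
--             else: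
--                 count = -1
--                 break
--
--         answer.append(count)
--
--     return answer
-- ===== SOURCE B (Python) =====
-- def solution(keymap, targets):
--     cache = {}
--     answer = []
--     for target in targets:
--         count = 0
--         for t in target:
--             if t not in cache:
--                 cache[t] = min((k.find(t) + 1 for k in keymap if t in k), default=-1)
--             m = cache[t]
--             if m == -1:
--                 count = -1
--                 break
--             count += m
--         answer.append(count)
--     return answer
-- ===== Notes on version B (the rewrite author's own statement) =====
-- stated objective: alternative
-- what changed: Replaces A's eager precomputed min-position dictionary over all keymap characters (with its special empty-dict comprehension branch) by a lazy per-target-character scan of the keymap, memoized only for characters actually requested.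
import Mathlib
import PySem

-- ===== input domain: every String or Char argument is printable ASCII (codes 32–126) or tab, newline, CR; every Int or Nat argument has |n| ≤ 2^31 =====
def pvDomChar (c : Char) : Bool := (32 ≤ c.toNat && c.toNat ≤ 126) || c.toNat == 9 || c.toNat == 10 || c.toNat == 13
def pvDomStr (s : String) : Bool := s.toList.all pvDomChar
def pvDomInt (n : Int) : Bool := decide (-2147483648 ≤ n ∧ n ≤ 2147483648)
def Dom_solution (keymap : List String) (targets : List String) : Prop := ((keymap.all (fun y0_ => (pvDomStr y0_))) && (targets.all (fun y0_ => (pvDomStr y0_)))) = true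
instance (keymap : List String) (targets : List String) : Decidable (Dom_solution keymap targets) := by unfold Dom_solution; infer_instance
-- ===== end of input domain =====

-- B replaces A's eager precomputed min-position table by a lazy memoized per-target-character keymap scan (work only for characters the targets actually use).

-- ===== PORT A =====
-- inner loop body: 'for k in key: …' updating keymap_dict
def pvStepChar (key : List Char) (d : PySem.Dict Char Int) (k : Char) : PySem.Dict Char Int :=
  if d.contains k then
    d.insert k (min (d.getD k 0) (PySem.Chars.find key [k] + 1))
  else
    d.insert k (PySem.Chars.find key [k] + 1)

-- 'for key in keymap: if keymap_dict: … else: {k: key.find(k)+1 for k in key}'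
def pvBuild (keymap : List String) : PySem.Dict Char Int :=
  keymap.foldl
    (fun d key =>
      if d.size ≠ 0 then
        key.toList.foldl (pvStepChar key.toList) d
      else
        key.toList.foldl (fun d2 k => d2.insert k (PySem.Chars.find key.toList [k] + 1))
          PySem.Dict.empty)
    PySem.Dict.empty

-- 'for t in target: …' with the break-as--1
def pvCountA (d : PySem.Dict Char Int) (count : Int) : List Char → Int
  | [] => count
  | t :: ts => if d.contains t then pvCountA d (count + d.getD t 0) ts else -1

def solution (keymap : List String) (targets : List String) : List Int :=
  let keymapDict := pvBuild keymap
  targets.map (fun target => pvCountA keymapDict 0 target.toList)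

-- ===== PORT B =====
-- positions = [k.find(t) + 1 for k in keymap if t in k]
def pvPositions (keymap : List String) (t : Char) : List Int :=
  (keymap.filter (fun k => PySem.Str.isIn (String.singleton t) k)).map
    (fun k => PySem.Str.find k (String.singleton t) + 1)

-- min((k.find(t) + 1 for k in keymap if t in k), default=-1)
def pvBest (keymap : List String) (t : Char) : Int :=
  match PySem.List.min? (pvPositions keymap t) (fun x => x) with
  | none => -1
  | some m => m

-- the inner 'for t in target' loop, threading the memo cache
def pvCountB (keymap : List String) (cache : PySem.Dict Char Int) (count : Int) :
    List Char → PySem.Dict Char Int × Int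
  | [] => (cache, count)
  | t :: ts =>
    let cache2 := if cache.contains t then cache else cache.insert t (pvBest keymap t)
    let m := cache2.getD t 0
    if m = -1 then (cache2, -1)
    else pvCountB keymap cache2 (count + m) ts

def solution_alt (keymap : List String) (targets : List String) : List Int :=
  (targets.foldl
    (fun acc target =>
      let r := pvCountB keymap acc.1 0 target.toList
      (r.1, acc.2 ++ [r.2]))
    ((PySem.Dict.empty : PySem.Dict Char Int), ([] : List Int))).2

-- ===== PRECONDITION & SPEC =====
def Spec_solution (keymap : List String) (targets : List String) (out : List Int) : Prop := out = solution_alt keymap targets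
instance (keymap : List String) (targets : List String) (out : List Int) : Decidable (Spec_solution keymap targets out) := by unfold Spec_solution; infer_instance

-- ===== CLAIM (what is proved, stated in full; the proofs are below) =====
def Claim_equal_solution : Prop := ∀ (keymap : List String) (targets : List String), Dom_solution keymap targets → Spec_solution keymap targets (solution keymap targets)

-- ===== LEMMAS AND PROOFS =====

-- option-min combinator: how A's dict entry for a char evolves
def pvOMin : Option Int → Option Int → Option Int
  | none, o => o
  | some u, none => some u
  | some u, some v => some (min u v)

theorem pvOMin_assoc (a b c : Option Int) : pvOMin (pvOMin a b) c = pvOMin a (pvOMin b c) := by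
  cases a <;> cases b <;> cases c <;> simp [pvOMin, min_assoc]

theorem foldl_min_pull (t : List Int) (a b : Int) :
    t.foldl min (min a b) = min a (t.foldl min b) := by
  induction t generalizing b with
  | nil => simp
  | cons x t ih => simp [List.foldl, min_assoc, ih]

theorem min?_id_cons_omin (x : Int) (ps : List Int) :
    PySem.List.min? (x :: ps) (fun y => y) = pvOMin (some x) (PySem.List.min? ps (fun y => y)) := by
  cases ps with
  | nil =>
      have h0 : PySem.List.min? ([] : List Int) (fun y => y) = none :=
        by rw [PySem.List.min?_eq_none_iff]
      simp [PySem.List.min?_id_cons, h0, pvOMin]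
  | cons p t =>
      simp [PySem.List.min?_id_cons, pvOMin, List.foldl, ← foldl_min_pull]

theorem singleton_infix_iff (c : Char) (l : List Char) : [c] <:+: l ↔ c ∈ l := by
  constructor
  · intro h; exact h.sublist.subset (List.mem_singleton_self c)
  · intro h
    obtain ⟨s, t, rfl⟩ := List.append_of_mem h
    exact ⟨s, t, by simp⟩

theorem isIn_singleton (c : Char) (k : String) :
    PySem.Str.isIn (String.singleton c) k = true ↔ c ∈ k.toList := by
  rw [PySem.Str.isIn_iff_infix]
  simp [singleton_infix_iff]

-- the dict-comprehension fold, pointwise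
theorem compr_get? (key : List Char) (l : List Char) (d : PySem.Dict Char Int) (c : Char) :
    ((l.foldl (fun d2 k => d2.insert k (PySem.Chars.find key [k] + 1)) d).get? c)
      = if c ∈ l then some (PySem.Chars.find key [c] + 1) else d.get? c := by
  induction l generalizing d with
  | nil => simp
  | cons k ls ih =>
      simp only [List.foldl, ih]
      by_cases hmem : c ∈ ls
      · simp [hmem]
      · by_cases hck : c = k
        · subst hck; simp [hmem, PySem.Dict.get?_insert_self]
        · simp [hmem, hck, PySem.Dict.get?_insert]

-- the incremental inner fold, pointwise
theorem inner_get? (key : List Char) (l : List Char) (d : PySem.Dict Char Int) (c : Char) :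
    ((l.foldl (pvStepChar key) d).get? c)
      = if c ∈ l then pvOMin (d.get? c) (some (PySem.Chars.find key [c] + 1)) else d.get? c := by
  induction l generalizing d with
  | nil => simp
  | cons k ls ih =>
      simp only [List.foldl, ih]
      by_cases hck : c = k
      · subst hck
        have hstep : (pvStepChar key d c).get? c
            = some ((pvOMin (d.get? c) (some (PySem.Chars.find key [c] + 1))).getD 0) := by
          unfold pvStepChar
          rcases h : d.get? c with _ | v
          · have hco : d.contains c = false := by
              rw [PySem.Dict.contains_eq_isSome_get?, h]; rfl
            simp [hco, PySem.Dict.get?_insert_self, pvOMin]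
          · have hco : d.contains c = true := by
              rw [PySem.Dict.contains_eq_isSome_get?, h]; rfl
            simp [hco, PySem.Dict.get?_insert_self, PySem.Dict.getD_eq_get?_getD, h, pvOMin]
        by_cases hmem : c ∈ ls
        · simp only [hmem, if_true, hstep]
          rcases d.get? c with _ | u <;> simp [pvOMin]
        · simp only [hmem, if_false, hstep, List.mem_cons, true_or, if_true]
          rcases d.get? c with _ | u <;> simp [pvOMin]
      · have hgk : (pvStepChar key d k).get? c = d.get? c := by
          unfold pvStepChar
          split <;> simp [PySem.Dict.get?_insert, hck]
        by_cases hmem : c ∈ ls <;>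
          simp [hmem, hck, hgk]

theorem size_zero_get? (d : PySem.Dict Char Int) (h : d.size = 0) (c : Char) :
    d.get? c = none := by
  rw [PySem.Dict.get?_eq_none_iff_not_mem_keys]
  intro hc
  have : d.keys.length = 0 := by
    simpa [PySem.Dict.keys, PySem.Dict.size] using h
  rw [List.length_eq_zero_iff] at this
  simp [this] at hc

-- one outer-loop step of A, pointwise
theorem step_get? (d : PySem.Dict Char Int) (key : String) (c : Char) :
    ((if d.size ≠ 0 then key.toList.foldl (pvStepChar key.toList) d
      else key.toList.foldl (fun d2 k => d2.insert k (PySem.Chars.find key.toList [k] + 1))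
        PySem.Dict.empty).get? c)
      = if c ∈ key.toList then pvOMin (d.get? c) (some (PySem.Chars.find key.toList [c] + 1))
        else d.get? c := by
  by_cases hs : d.size = 0
  · have hdc := size_zero_get? d hs c
    simp [hs, compr_get?, hdc, pvOMin]
  · simp [hs, inner_get?]

-- A's dict agrees pointwise with the min over B's positions list
theorem build_get?_aux (ks : List String) (d : PySem.Dict Char Int) (c : Char) :
    ((ks.foldl
        (fun d key =>
          if d.size ≠ 0 then key.toList.foldl (pvStepChar key.toList) d
          else key.toList.foldl
            (fun d2 k => d2.insert k (PySem.Chars.find key.toList [k] + 1)) PySem.Dict.empty)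
        d).get? c)
      = pvOMin (d.get? c) (PySem.List.min? (pvPositions ks c) (fun x => x)) := by
  induction ks generalizing d with
  | nil =>
      simp only [List.foldl, pvPositions, List.filter_nil, List.map_nil]
      rcases d.get? c with _ | u <;> simp [pvOMin, PySem.List.min?]
  | cons key rest ih =>
      simp only [List.foldl, ih, step_get?]
      by_cases hmem : c ∈ key.toList
      · have hin : PySem.Str.isIn (String.singleton c) key = true := (isIn_singleton c key).mpr hmem
        have hfind : PySem.Str.find key (String.singleton c) = PySem.Chars.find key.toList [c] := by
          simp [PySem.Str.find_eq]
        rw [if_pos hmem]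
        simp only [pvPositions, List.filter_cons, hin, if_true, List.map_cons, hfind,
          min?_id_cons_omin, ← pvOMin_assoc]
      · have hin : PySem.Str.isIn (String.singleton c) key = false := by
          rcases h : PySem.Str.isIn (String.singleton c) key with _ | _
          · rfl
          · exact absurd ((isIn_singleton c key).mp h) hmem
        rw [if_neg hmem]
        simp only [pvPositions, List.filter_cons, hin]
        simp

theorem build_get? (keymap : List String) (c : Char) :
    (pvBuild keymap).get? c = PySem.List.min? (pvPositions keymap c) (fun x => x) := by
  unfold pvBuild
  rw [build_get?_aux]
  rcases h : PySem.List.min? (pvPositions keymap c) (fun x => x) with _ | m <;> simp [pvOMin]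

-- every memo entry holds the value pvBest would compute
def pvWF (keymap : List String) (cache : PySem.Dict Char Int) : Prop :=
  ∀ c v, cache.get? c = some v → v = pvBest keymap c

theorem positions_ge_one (keymap : List String) (t : Char) :
    ∀ x ∈ pvPositions keymap t, 1 ≤ x := by
  intro x hx
  unfold pvPositions at hx
  simp only [List.mem_map, List.mem_filter] at hx
  obtain ⟨k, ⟨_, hin⟩, rfl⟩ := hx
  have h0 : 0 ≤ PySem.Str.find k (String.singleton t) := by
    rw [PySem.Str.find_nonneg_iff]
    exact (PySem.Str.isIn_iff_infix _ _).mp hin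
  omega

theorem best_of_some (keymap : List String) (t : Char) (m : Int)
    (h : PySem.List.min? (pvPositions keymap t) (fun x => x) = some m) :
    pvBest keymap t = m ∧ m ≠ -1 := by
  have hm : m ∈ pvPositions keymap t := PySem.List.min?_mem h
  have h1 := positions_ge_one keymap t m hm
  exact ⟨by unfold pvBest; rw [h], by omega⟩

theorem cache2_get (keymap : List String) (cache : PySem.Dict Char Int) (t : Char)
    (hwf : pvWF keymap cache) :
    ((if cache.contains t then cache else cache.insert t (pvBest keymap t)).get? t)
      = some (pvBest keymap t) := by
  by_cases hc : cache.contains t = true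
  · rcases h : cache.get? t with _ | v
    · exact absurd (by rw [PySem.Dict.contains_eq_isSome_get?, h] at hc; exact hc) (by simp)
    · rw [if_pos hc, h, hwf t v h]
  · simp [hc, PySem.Dict.get?_insert_self]

theorem cache2_wf (keymap : List String) (cache : PySem.Dict Char Int) (t : Char)
    (hwf : pvWF keymap cache) :
    pvWF keymap (if cache.contains t then cache else cache.insert t (pvBest keymap t)) := by
  by_cases hc : cache.contains t = true
  · rw [if_pos hc]; exact hwf
  · rw [if_neg hc]
    intro c v hcv
    by_cases hct : c = t
    · subst hct
      rw [PySem.Dict.get?_insert_self] at hcv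
      exact (Option.some_inj.mp hcv).symm
    · have heq : (cache.insert t (pvBest keymap t)).get? c = cache.get? c := by
        simp [PySem.Dict.get?_insert, hct]
      rw [heq] at hcv
      exact hwf c v hcv

theorem count_eq (keymap : List String) (ts : List Char) :
    ∀ (cache : PySem.Dict Char Int) (count : Int), pvWF keymap cache →
      (pvCountB keymap cache count ts).2 = pvCountA (pvBuild keymap) count ts
        ∧ pvWF keymap (pvCountB keymap cache count ts).1 := by
  induction ts with
  | nil => intro cache count hwf; exact ⟨rfl, hwf⟩
  | cons t rest ih =>
      intro cache count hwf
      have hget := cache2_get keymap cache t hwf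
      have hwf2 := cache2_wf keymap cache t hwf
      set cache2 := if cache.contains t then cache else cache.insert t (pvBest keymap t) with hc2
      have hgetD : cache2.getD t 0 = pvBest keymap t := by
        rw [PySem.Dict.getD_eq_get?_getD, hget]; rfl
      have hstep : pvCountB keymap cache count (t :: rest)
          = if cache2.getD t 0 = -1 then (cache2, -1)
            else pvCountB keymap cache2 (count + cache2.getD t 0) rest := by
        rw [hc2]; rfl
      rw [hstep, hgetD]
      rcases h : PySem.List.min? (pvPositions keymap t) (fun x => x) with _ | m
      · -- char absent from every key: B hits the -1 sentinel, A's dict lookup fails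
        have hb : pvBest keymap t = -1 := by unfold pvBest; rw [h]
        have hcA : (pvBuild keymap).contains t = false := by
          rw [PySem.Dict.contains_eq_isSome_get?, build_get?, h]; rfl
        rw [hb, if_pos rfl]
        refine ⟨?_, hwf2⟩
        unfold pvCountA
        simp [hcA]
      · obtain ⟨hbm, hne⟩ := best_of_some keymap t m h
        have hgA : (pvBuild keymap).get? t = some m := by rw [build_get?, h]
        have hcA : (pvBuild keymap).contains t = true := by
          rw [PySem.Dict.contains_eq_isSome_get?, hgA]; rfl
        rw [hbm, if_neg hne]
        have hA : pvCountA (pvBuild keymap) count (t :: rest)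
            = if (pvBuild keymap).contains t = true then
                pvCountA (pvBuild keymap) (count + (pvBuild keymap).getD t 0) rest
              else -1 := rfl
        rw [hA, if_pos hcA, PySem.Dict.getD_eq_get?_getD, hgA, Option.getD_some]
        exact ih cache2 (count + m) hwf2

theorem fold_eq (keymap : List String) (tg : List String) :
    ∀ (cache : PySem.Dict Char Int) (acc : List Int), pvWF keymap cache →
      (tg.foldl
        (fun acc target =>
          let r := pvCountB keymap acc.1 0 target.toList
          (r.1, acc.2 ++ [r.2]))
        (cache, acc)).2
        = acc ++ tg.map (fun target => pvCountA (pvBuild keymap) 0 target.toList) := by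
  induction tg with
  | nil => intro cache acc _; simp
  | cons target rest ih =>
      intro cache acc hwf
      obtain ⟨hval, hwf'⟩ := count_eq keymap target.toList cache 0 hwf
      simp only [List.foldl, List.map_cons]
      rw [ih _ _ hwf', hval, List.append_assoc]
      rfl

-- ===== VERDICT (by name: the statement is the Claim_ definition above) =====
theorem solution_spec : Claim_equal_solution := by
  intro keymap targets _
  unfold Spec_solution solution solution_alt
  rw [fold_eq keymap targets PySem.Dict.empty [] (fun c v h => by simp at h)]
  rfl
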